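-- pv_equiv track=rewrite | github.com/soma345/Android-Project | searchEngine- Book Quest/searchEngine/expand.py | expQuery
-- ===== SOURCE A (Python) =====
-- def expQuery (vectorMod,query):
--     term1, term2, val1, val2 = '', '', 0, 0
--     for term in vectorMod:
--         if term not in query and vectorMod[term] > 0:
--             weight = vectorMod[term]
--             if weight > val1:
--                 term1, val1, term2, val2 = term, weight, term1, val1
--             elif weight > val2:
--                 term2, val2 = term, weight
--             else:
--                 pass
--     if term1:query =  query+" "+(term1)
--     if term2: query = query+" "+(term2)
--     return query
-- ===== SOURCE B (Python) =====
-- def expQuery(vectorMod, query):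
--     candidates = [t for t in vectorMod if t not in query and vectorMod[t] > 0]
--     for term in sorted(candidates, key=lambda t: vectorMod[t], reverse=True)[:2]:
--         if term:
--             query = query + " " + term
--     return query
-- ===== Notes on version B (the rewrite author's own statement) =====
-- stated objective: idiomatic
-- what changed: Replaces A's running top-2 tracking with four scalar variables by a filter comprehension followed by a stable reverse sort on weight and taking the first two terms.
import Mathlib
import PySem

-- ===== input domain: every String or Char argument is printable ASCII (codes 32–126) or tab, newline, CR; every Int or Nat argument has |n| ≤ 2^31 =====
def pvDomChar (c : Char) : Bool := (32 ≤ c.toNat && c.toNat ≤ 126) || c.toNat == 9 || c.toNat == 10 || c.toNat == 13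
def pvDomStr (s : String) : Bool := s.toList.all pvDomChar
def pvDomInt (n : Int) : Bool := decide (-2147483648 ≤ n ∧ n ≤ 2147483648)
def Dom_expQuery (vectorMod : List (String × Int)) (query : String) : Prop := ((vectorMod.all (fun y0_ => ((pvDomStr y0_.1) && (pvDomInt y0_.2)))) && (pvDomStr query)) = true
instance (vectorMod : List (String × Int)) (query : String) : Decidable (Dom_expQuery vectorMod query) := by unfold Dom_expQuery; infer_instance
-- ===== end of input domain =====

-- B replaces A's running top-2 tracking by filter + stable reverse sort + take 2 (same result, more idiomatic).

-- ===== PORT A =====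
-- running state (term1, val1, term2, val2); one pass over the dict's items in order
def pvStepA (query : String) (s : String × Int × String × Int) (p : String × Int) :
    String × Int × String × Int :=
  if ¬ PySem.Str.isIn p.1 query = true ∧ p.2 > 0 then
    if p.2 > s.2.1 then (p.1, p.2, s.1, s.2.1)
    else if p.2 > s.2.2.2 then (s.1, s.2.1, p.1, p.2)
    else s
  else s

def expQuery (vectorMod : List (String × Int)) (query : String) : String :=
  let st := vectorMod.foldl (pvStepA query) ("", 0, "", 0)
  let q1 := if st.1 ≠ "" then query ++ " " ++ st.1 else query
  if st.2.2.1 ≠ "" then q1 ++ " " ++ st.2.2.1 else q1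

-- ===== PORT B =====
def expQuery_alt (vectorMod : List (String × Int)) (query : String) : String :=
  let candidates := vectorMod.filter (fun p => (!PySem.Str.isIn p.1 query) && decide (p.2 > 0))
  let top := (PySem.List.sorted candidates (fun p => p.2) true).take 2
  top.foldl (fun q p => if p.1 ≠ "" then q ++ " " ++ p.1 else q) query

-- ===== PRECONDITION & SPEC =====
def Spec_expQuery (vectorMod : List (String × Int)) (query : String) (out : String) : Prop := out = expQuery_alt vectorMod query
instance (vectorMod : List (String × Int)) (query : String) (out : String) : Decidable (Spec_expQuery vectorMod query out) := by unfold Spec_expQuery; infer_instance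

-- ===== CLAIM (what is proved, stated in full; the proofs are below) =====
def Claim_equal_expQuery : Prop := ∀ (vectorMod : List (String × Int)) (query : String), Dom_expQuery vectorMod query → Spec_expQuery vectorMod query (expQuery vectorMod query)

-- ===== LEMMAS AND PROOFS =====

-- the (term1, val1, term2, val2) state a descending-sorted candidate list denotes
def pvTop2 (s : List (String × Int)) : String × Int × String × Int :=
  match s with
  | [] => ("", 0, "", 0)
  | [a] => (a.1, a.2, "", 0)
  | a :: b :: _ => (a.1, a.2, b.1, b.2)

-- A's one-pass state over l equals the padded first two entries of the stable reverse sort of l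
theorem pvFold_eq_top2 (query : String) (l : List (String × Int))
    (hpos : ∀ p ∈ l, 0 < p.2) (hin : ∀ p ∈ l, PySem.Str.isIn p.1 query = false) :
    l.foldl (pvStepA query) ("", 0, "", 0) = pvTop2 (PySem.List.sorted l (fun p => p.2) true) := by
  induction l using List.reverseRecOn with
  | nil => simp [PySem.List.sorted, pvTop2]
  | append_singleton l x ih =>
    have hx : 0 < x.2 := hpos x (by simp)
    have hxin : PySem.Chars.isIn x.1.toList query.toList = false := by
      have := hin x (by simp); rwa [PySem.Str.isIn_eq] at this
    have hsx : PySem.List.sorted (l ++ [x]) (fun p : String × Int => p.2) true =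
        PySem.List.insertBy (fun a b : String × Int => decide (b.2 < a.2)) x
          (PySem.List.sorted l (fun p => p.2) true) := by
      rw [PySem.List.sorted_rev_eq_foldl_insertBy, PySem.List.sorted_rev_eq_foldl_insertBy,
        List.foldl_append, List.foldl_cons, List.foldl_nil]
    rw [List.foldl_append, List.foldl_cons, List.foldl_nil,
      ih (fun p hp => hpos p (by simp [hp])) (fun p hp => hin p (by simp [hp])), hsx]
    rcases hs : PySem.List.sorted l (fun p : String × Int => p.2) true with _ | ⟨a, _ | ⟨b, t⟩⟩
    · simp [PySem.List.insertBy, pvTop2, pvStepA, hxin, hx]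
    · have ha : 0 < a.2 := hpos a (by
        have := (PySem.List.mem_sorted l (fun p : String × Int => p.2) true a).mp (by simp [hs])
        simp [this])
      by_cases h1 : a.2 < x.2
      · simp [PySem.List.insertBy, pvTop2, pvStepA, hxin, hx, h1]
      · simp [PySem.List.insertBy, pvTop2, pvStepA, hxin, hx, h1]
    · by_cases h1 : a.2 < x.2
      · simp [PySem.List.insertBy, pvTop2, pvStepA, hxin, hx, h1]
      · by_cases h2 : b.2 < x.2
        · simp [PySem.List.insertBy, pvTop2, pvStepA, hxin, hx, h1, h2]
        · simp [PySem.List.insertBy, pvTop2, pvStepA, hxin, hx, h1, h2]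

theorem expQuery_eq (vectorMod : List (String × Int)) (query : String) :
    expQuery vectorMod query = expQuery_alt vectorMod query := by
  unfold expQuery expQuery_alt
  set c := vectorMod.filter (fun p => (!PySem.Str.isIn p.1 query) && decide (p.2 > 0)) with hc
  have hmem : ∀ p ∈ c, PySem.Str.isIn p.1 query = false ∧ 0 < p.2 := by
    intro p hp
    have := List.of_mem_filter hp
    simp only [Bool.and_eq_true, Bool.not_eq_true', decide_eq_true_eq] at this
    exact this
  have hfold : vectorMod.foldl (pvStepA query) ("", 0, "", 0) =
      c.foldl (pvStepA query) ("", 0, "", 0) := by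
    rw [hc, List.foldl_filter]
    congr 1
    funext s p
    by_cases h : ((!PySem.Str.isIn p.1 query) && decide (p.2 > 0)) = true
    · rw [if_pos h]
    · rw [if_neg h]
      simp only [Bool.and_eq_true, Bool.not_eq_true', decide_eq_true_eq] at h
      unfold pvStepA
      rw [if_neg]
      intro hcond
      exact h ⟨by simpa using hcond.1, hcond.2⟩
  have hne : ∀ p ∈ PySem.List.sorted c (fun p : String × Int => p.2) true, p.1 ≠ "" := by
    intro p hp he
    have hm := (PySem.List.mem_sorted c (fun p : String × Int => p.2) true p).mp hp
    have := (hmem p hm).1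
    rw [he, PySem.Str.isIn_eq] at this
    simp [PySem.Chars.isIn_nil] at this
  rw [hfold, pvFold_eq_top2 query c (fun p hp => (hmem p hp).2) (fun p hp => (hmem p hp).1)]
  rcases hs : PySem.List.sorted c (fun p : String × Int => p.2) true with _ | ⟨a, _ | ⟨b, t⟩⟩
  · simp [pvTop2, hs]
  · have := hne a (by simp [hs])
    simp [pvTop2, hs, this]
  · have h1 := hne a (by simp [hs])
    have h2 := hne b (by simp [hs])
    simp [pvTop2, hs, h1, h2]

-- ===== VERDICT (by name: the statement is the Claim_ definition above) =====
theorem expQuery_spec : Claim_equal_expQuery := by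
  intro vectorMod query _
  unfold Spec_expQuery
  exact expQuery_eq vectorMod query
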